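-- pv_equiv track=rewrite | github.com/FairPlayRose/Advent-of-Code-2024 | python/Day 15 - Warehouse Woes 1.py | move_list
-- ===== SOURCE A (Python) =====
-- def move_list(direction: tuple[int,int], start: tuple[int,int], warehouse: list[list[str]]) -> list[tuple[int,int]] | None:
--     dy, dx = direction
--     sy, sx = start
--
--     if warehouse[sy+dy][sx+dx] == "#":
--         return None
--     if warehouse[sy+dy][sx+dx] == '.':
--         return [(sy+dy,sx+dx)]
--
--     moves = move_list(direction, (sy+dy,sx+dx), warehouse)
--
--     if moves == None:
--         return None
--
--     moves.append((sy+dy,sx+dx))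
--
--     return moves
-- ===== SOURCE B (Python) =====
-- def move_list(direction, start, warehouse):
--     dy, dx = direction
--     sy, sx = start
--     # phase 1: find the distance k of the first '#' or '.' cell along the ray
--     k = 1
--     while True:
--         cell = warehouse[sy + k * dy][sx + k * dx]
--         if cell == "#":
--             return None
--         if cell == ".":
--             # phase 2: build the cell list in closed form, far-to-near
--             return [(sy + i * dy, sx + i * dx) for i in range(k, 0, -1)]
--         k += 1
-- ===== Notes on version B (the rewrite author's own statement) =====
-- stated objective: alternative
-- what changed: Replaces A's recursion (which carries the whole list through the call stack, appending after each return) with a two-phase scan: first find only the distance k of the terminating '#'/'.' cell, then construct the answer in closed form as a comprehension over range(k,0,-1); Pre_ excludes only inputs where A raises (IndexError along the walk, or unbounded recursion when no '#'/'.' cell is reached).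
import Mathlib
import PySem

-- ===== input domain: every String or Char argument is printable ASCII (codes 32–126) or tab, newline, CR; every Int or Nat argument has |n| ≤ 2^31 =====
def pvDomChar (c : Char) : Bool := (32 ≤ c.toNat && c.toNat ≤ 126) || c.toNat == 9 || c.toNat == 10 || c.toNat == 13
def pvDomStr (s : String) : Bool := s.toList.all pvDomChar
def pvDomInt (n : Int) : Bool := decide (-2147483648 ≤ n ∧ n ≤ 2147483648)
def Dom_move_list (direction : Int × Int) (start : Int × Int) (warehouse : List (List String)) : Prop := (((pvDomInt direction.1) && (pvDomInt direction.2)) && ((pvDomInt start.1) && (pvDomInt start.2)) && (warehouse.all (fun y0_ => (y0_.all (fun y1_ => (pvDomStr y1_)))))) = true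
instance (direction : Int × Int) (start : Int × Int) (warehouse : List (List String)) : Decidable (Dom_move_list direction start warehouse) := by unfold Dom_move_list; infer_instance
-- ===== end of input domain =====

-- B replaces A's list-carrying recursion by a two-phase scan: find the distance k of the
-- first '#'/'.' cell, then build the answer in closed form over range(k,0,-1)
-- (objective: alternative decomposition, O(1) control stack).

-- warehouse[y][x] with Python indexing; none = IndexError (excluded by Pre_)
def cellAt (warehouse : List (List String)) (y x : Int) : Option String :=
  match PySem.List.pyGet? warehouse y with
  | none => none
  | some row => PySem.List.pyGet? row x

-- Fuel bound: any walk that Python finishes (Pre_) takes at most this many steps;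
-- the fuel is only a totality guard, never reached on inputs satisfying Pre_.
def fuelK (warehouse : List (List String)) : Nat :=
  2 * (warehouse.length + (warehouse.map List.length).sum) + 2

-- ===== PORT A =====
-- literal transliteration of A's recursion; 'none' on the cellAt = none branch stands for
-- Python's IndexError, and fuel 0 for unbounded recursion — both outside Pre_.
def moveA (direction : Int × Int) (warehouse : List (List String)) :
    Int × Int → Nat → Option (List (Int × Int))
  | _, 0 => none
  | (sy, sx), n + 1 =>
    let ny := sy + direction.1
    let nx := sx + direction.2
    match cellAt warehouse ny nx with
    | none => none
    | some c =>
      if c = "#" then none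
      else if c = "." then some [(ny, nx)]
      else
        match moveA direction warehouse (ny, nx) n with
        | none => none
        | some moves => some (moves ++ [(ny, nx)])

def move_list (direction : Int × Int) (start : Int × Int) (warehouse : List (List String)) : Option (List (Int × Int)) :=
  moveA direction warehouse start (fuelK warehouse)

-- ===== PORT B =====
-- phase 1 of Source B: the while-loop that only advances the counter k until '#' or '.'
def findStop (direction : Int × Int) (start : Int × Int) (warehouse : List (List String)) :
    Nat → Int → Option Int
  | 0, _ => none
  | n + 1, k =>
    match cellAt warehouse (start.1 + k * direction.1) (start.2 + k * direction.2) with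
    | none => none
    | some c =>
      if c = "#" then none
      else if c = "." then some k
      else findStop direction start warehouse n (k + 1)

-- phase 2 of Source B: the closed-form comprehension over range(k, 0, -1)
def move_list_alt (direction : Int × Int) (start : Int × Int) (warehouse : List (List String)) : Option (List (Int × Int)) :=
  (findStop direction start warehouse (fuelK warehouse) 1).map
    (fun k => (PySem.List.pyRange k 0 (-1)).map
      (fun i => (start.1 + i * direction.1, start.2 + i * direction.2)))

-- ===== PRECONDITION & SPEC =====
-- Pre_ excludes exactly the inputs where Python A raises (IndexError on an out-of-range
-- index along the walk, or unbounded recursion when no '#'/'.' cell is ever reached):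
-- it holds iff the ray from start in the given direction reaches a '#' or '.' cell after
-- passing only in-range "box" cells (neither '#' nor '.').
def Pre_move_list (direction : Int × Int) (start : Int × Int) (warehouse : List (List String)) : Prop :=
  ∃ k ∈ Finset.Icc 1 (fuelK warehouse),
    (cellAt warehouse (start.1 + (k : Int) * direction.1) (start.2 + (k : Int) * direction.2) = some "#" ∨
     cellAt warehouse (start.1 + (k : Int) * direction.1) (start.2 + (k : Int) * direction.2) = some ".") ∧
    ∀ j ∈ Finset.Icc 1 (k - 1),
      cellAt warehouse (start.1 + (j : Int) * direction.1) (start.2 + (j : Int) * direction.2) ≠ none ∧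
      cellAt warehouse (start.1 + (j : Int) * direction.1) (start.2 + (j : Int) * direction.2) ≠ some "#" ∧
      cellAt warehouse (start.1 + (j : Int) * direction.1) (start.2 + (j : Int) * direction.2) ≠ some "."
instance (direction : Int × Int) (start : Int × Int) (warehouse : List (List String)) : Decidable (Pre_move_list direction start warehouse) := by unfold Pre_move_list; infer_instance

def pvWitness_move_list : (Int × Int) × (Int × Int) × List (List String) :=
  ((0, 1), (0, 0), [["@", "O", "."]])

def Spec_move_list (direction : Int × Int) (start : Int × Int) (warehouse : List (List String)) (out : Option (List (Int × Int))) : Prop := out = move_list_alt direction start warehouse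
instance (direction : Int × Int) (start : Int × Int) (warehouse : List (List String)) (out : Option (List (Int × Int))) : Decidable (Spec_move_list direction start warehouse out) := by unfold Spec_move_list; infer_instance

-- ===== CLAIM (what is proved, stated in full; the proofs are below) =====
def Claim_equal_move_list : Prop := ∀ (direction : Int × Int) (start : Int × Int) (warehouse : List (List String)), Dom_move_list direction start warehouse → Pre_move_list direction start warehouse → Spec_move_list direction start warehouse (move_list direction start warehouse)

-- ===== LEMMAS AND PROOFS =====

-- range(m, k, -1) with k < m ends with k+1
theorem pyRange_neg_snoc (m k : Int) (h : k < m) :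
    PySem.List.pyRange m k (-1) = PySem.List.pyRange m (k + 1) (-1) ++ [k + 1] := by
  rw [PySem.List.pyRange_neg_one, PySem.List.pyRange_neg_one]
  have h1 : (m - k).toNat = (m - (k + 1)).toNat + 1 := by omega
  rw [h1, List.range_succ, List.map_append]
  simp
  omega

theorem findStop_ge (direction : Int × Int) (start : Int × Int) (warehouse : List (List String)) :
    ∀ (n : Nat) (k m : Int), findStop direction start warehouse n k = some m → k ≤ m := by
  intro n
  induction n with
  | zero => intro k m h; simp [findStop] at h
  | succ n ih =>
    intro k m h
    simp only [findStop] at h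
    cases hc : cellAt warehouse (start.1 + k * direction.1) (start.2 + k * direction.2) with
    | none => rw [hc] at h; exact absurd h (by simp)
    | some c =>
      rw [hc] at h
      by_cases h1 : c = "#"
      · simp [h1] at h
      · by_cases h2 : c = "."
        · simp [h2] at h; omega
        · simp only [h1, h2, if_false] at h
          have := ih (k + 1) m h
          omega

-- A's recursion from the k-th cell of the ray equals phase 1 from k+1 followed by phase 2
-- truncated at k (the core correspondence between the two decompositions).
theorem moveA_eq_findStop (direction : Int × Int) (start : Int × Int) (warehouse : List (List String)) :
    ∀ (n : Nat) (k : Int),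
      moveA direction warehouse (start.1 + k * direction.1, start.2 + k * direction.2) n =
        (findStop direction start warehouse n (k + 1)).map
          (fun m => (PySem.List.pyRange m k (-1)).map
            (fun i => (start.1 + i * direction.1, start.2 + i * direction.2))) := by
  intro n
  induction n with
  | zero => intro k; rfl
  | succ n ih =>
    intro k
    have hpos : start.1 + k * direction.1 + direction.1 = start.1 + (k + 1) * direction.1 := by ring
    have hpos2 : start.2 + k * direction.2 + direction.2 = start.2 + (k + 1) * direction.2 := by ring
    simp only [moveA, findStop, hpos, hpos2]
    cases hc : cellAt warehouse (start.1 + (k + 1) * direction.1) (start.2 + (k + 1) * direction.2) with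
    | none => simp
    | some c =>
      by_cases h1 : c = "#"
      · simp [h1]
      · by_cases h2 : c = "."
        · subst h2
          have hne : ¬("." = "#") := by decide
          simp only [hne, reduceIte, Option.map_some]
          rw [PySem.List.pyRange_neg_one_cons (show k < k + 1 by omega)]
          simp
        · simp only [h1, h2, if_false]
          rw [ih (k + 1)]
          cases hf : findStop direction start warehouse n (k + 1 + 1) with
          | none => rfl
          | some m =>
            have hge := findStop_ge direction start warehouse n (k + 1 + 1) m hf
            simp only [Option.map_some]
            rw [pyRange_neg_snoc m k (by omega), List.map_append]
            rfl

theorem witness_ok :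
    Dom_move_list pvWitness_move_list.1 pvWitness_move_list.2.1 pvWitness_move_list.2.2 ∧
    Pre_move_list pvWitness_move_list.1 pvWitness_move_list.2.1 pvWitness_move_list.2.2 := by
  decide

-- ===== VERDICT (by name: the statement is the Claim_ definition above) =====
theorem move_list_spec : Claim_equal_move_list := by
  intro direction start warehouse _ _
  show move_list direction start warehouse = move_list_alt direction start warehouse
  unfold move_list move_list_alt
  have h := moveA_eq_findStop direction start warehouse (fuelK warehouse) 0
  simpa using h
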